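-- pv_equiv track=rewrite | github.com/MUsamatariq27/mini-Projects | mastermindGame/mastermind.py | find_colour_correct
-- ===== SOURCE A (Python) =====
-- def find_colour_correct(clist, glist1):
--     '''
--     (list, list) ---> list
--         Given two lists of single character strs return a list of 'w's
--         where the number of 'w's is equal to the number of str in the
--         second list that have the same value as str in the first list
--         but different position. Only one 'w' is returned for each str in
--         the first list.
--     '''
--     glist = []
--     for s in glist1:
--         glist.append(s)
--     index = 0
--     while index < len(clist) and index < len(glist):
--         if clist[index] == glist[index]:
--             clist = clist[:index] + clist[index+1:]
--             glist = glist[:index] + glist[index+1:]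
--             index = -1
--         index = index + 1
--     g_word = ''
--     for item in glist:
--         g_word = g_word + item
--     newlist = []
--     for i in clist:
--         count = g_word.count(i)
--         if count >= 1:
--             newlist.append('w')
--             glist.remove(i)
--             g_word = ''
--             for let in glist:
--                 g_word = g_word + let
--     return newlist
-- ===== SOURCE B (Python) =====
-- def find_colour_correct(clist, glist1):
--     exact = 0
--     for c, g in zip(clist, glist1):
--         if c == g:
--             exact += 1
--     gcounts = {}
--     for g in glist1:
--         gcounts[g] = gcounts.get(g, 0) + 1
--     ccounts = {}
--     for c in clist:
--         ccounts[c] = ccounts.get(c, 0) + 1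
--     common = 0
--     for c, n in ccounts.items():
--         gn = gcounts.get(c, 0)
--         common += n if n < gn else gn
--     return ['w'] * (common - exact)
-- ===== Notes on version B (the rewrite author's own statement) =====
-- stated objective: faster
-- what changed: Instead of physically deleting exact matches by repeated list slicing with a restart and then rescanning a rebuilt string with .count/.remove per colour, B computes two aggregates in single passes - the number of positional matches over zip(clist, glist1) and the multiset overlap via two hash-map counters - and returns ['w'] * (overlap - exact).
-- outside the precondition, e.g. on find_colour_correct(['a', 'aa'], ['a', 'a']): A returns [], B returns []; on find_colour_correct(['a'], ['ab']): A raises ValueError, B returns []; on find_colour_correct(['aa'], ['a', 'a']): A raises ValueError, B returns []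
import Mathlib
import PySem

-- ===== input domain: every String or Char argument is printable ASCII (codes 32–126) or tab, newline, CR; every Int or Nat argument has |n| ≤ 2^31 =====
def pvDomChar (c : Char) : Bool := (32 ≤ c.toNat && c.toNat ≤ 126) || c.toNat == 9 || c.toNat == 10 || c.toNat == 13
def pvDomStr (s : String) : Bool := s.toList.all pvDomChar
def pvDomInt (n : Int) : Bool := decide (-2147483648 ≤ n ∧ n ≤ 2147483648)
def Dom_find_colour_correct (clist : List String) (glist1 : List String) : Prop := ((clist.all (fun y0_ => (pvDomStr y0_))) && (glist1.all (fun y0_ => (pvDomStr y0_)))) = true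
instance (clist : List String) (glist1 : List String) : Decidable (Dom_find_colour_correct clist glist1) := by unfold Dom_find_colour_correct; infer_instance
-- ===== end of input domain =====

-- B replaces A's delete-exact-matches-then-rescan loops by two single-pass aggregates
-- (positional matches over zip, multiset overlap via counters) and returns ['w'] * (overlap - exact).

-- ===== PORT A =====
-- the 'while' loop: 'clist[:index] + clist[index+1:]' is clist.take index ++ clist.drop (index+1)
-- (exact, since 0 ≤ index here); 'index = -1' followed by 'index = index + 1' restarts at 0.
def fccRemove (clist glist : List String) (index : Nat) : List String × List String :=
  if h : index < clist.length ∧ index < glist.length then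
    if clist[index]'h.1 = glist[index]'h.2 then
      fccRemove (clist.take index ++ clist.drop (index+1)) (glist.take index ++ glist.drop (index+1)) 0
    else
      fccRemove clist glist (index + 1)
  else (clist, glist)
termination_by (clist.length, clist.length - index)
decreasing_by
  · apply Prod.Lex.left; simp; omega
  · apply Prod.Lex.right; omega

-- "g_word = ''; for item in glist: g_word = g_word + item" — the string as its list of chars (exact)
def fccConcat (glist : List String) : List Char :=
  glist.foldl (fun w s => w ++ s.toList) []

-- "for i in clist: count = g_word.count(i); if count >= 1: append 'w'; glist.remove(i); rebuild g_word"
def fccGreedy (clist glist : List String) (g_word : List Char) (newlist : List String) : List String :=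
  match clist with
  | [] => newlist
  | c :: rest =>
    let count := PySem.Chars.count g_word c.toList
    if 1 ≤ count then
      match PySem.List.remove? glist c with
      | some glist' => fccGreedy rest glist' (fccConcat glist') (newlist ++ ["w"])
      | none => newlist  -- Python raises ValueError here; such inputs are outside Pre_
    else
      fccGreedy rest glist g_word newlist

def find_colour_correct (clist : List String) (glist1 : List String) : List String :=
  let glist := glist1.foldl (fun acc s => acc ++ [s]) []
  let p := fccRemove clist glist 0
  fccGreedy p.1 p.2 (fccConcat p.2) []

-- ===== PORT B =====
def find_colour_correct_alt (clist : List String) (glist1 : List String) : List String :=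
  let exact := (clist.zip glist1).foldl (fun acc p => if p.1 = p.2 then acc + 1 else acc) (0 : Int)
  let gcounts := glist1.foldl (fun d g => d.insert g (d.getD g 0 + 1)) (PySem.Dict.empty : PySem.Dict String Int)
  let ccounts := clist.foldl (fun d c => d.insert c (d.getD c 0 + 1)) (PySem.Dict.empty : PySem.Dict String Int)
  let common := ccounts.items.foldl
    (fun acc p => acc + (if p.2 < gcounts.getD p.1 0 then p.2 else gcounts.getD p.1 0)) (0 : Int)
  PySem.List.pyRepeat ["w"] (common - exact)

-- ===== PRECONDITION & SPEC =====
-- Pre_ admits a colour x of clist if either clist holds no more copies of x than glist1 (so A's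
-- greedy removal never runs out of x), or x never occurs as a substring of a glued-together
-- subsequence of glist1 without being one of its elements; outside Pre_ A's 'g_word.count(i)' can
-- see a substring occurrence with no matching list element and 'glist.remove(i)' then raises
-- ValueError (e.g. clist=['a'], glist1=['ab']); on a few such inputs A instead returns early with
-- the same value as B (see cites).
def Pre_find_colour_correct (clist : List String) (glist1 : List String) : Prop :=
  ∀ x ∈ clist,
    clist.count x ≤ glist1.count x ∨
    ∀ sl ∈ glist1.sublists,
      PySem.Chars.isIn x.toList (sl.flatMap String.toList) = true → x ∈ sl
instance (clist : List String) (glist1 : List String) : Decidable (Pre_find_colour_correct clist glist1) := by unfold Pre_find_colour_correct; infer_instance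

def pvWitness_find_colour_correct : List String × List String :=
  (["r", "g", "b", "g"], ["g", "r", "y", "g"])

def Spec_find_colour_correct (clist : List String) (glist1 : List String) (out : List String) : Prop := out = find_colour_correct_alt clist glist1
instance (clist : List String) (glist1 : List String) (out : List String) : Decidable (Spec_find_colour_correct clist glist1 out) := by unfold Spec_find_colour_correct; infer_instance

-- ===== CLAIM (what is proved, stated in full; the proofs are below) =====
def Claim_equal_find_colour_correct : Prop := ∀ (clist : List String) (glist1 : List String), Dom_find_colour_correct clist glist1 → Pre_find_colour_correct clist glist1 → Spec_find_colour_correct clist glist1 (find_colour_correct clist glist1)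


-- ===== LEMMAS AND PROOFS =====

-- zipping commutes with deleting position i from both lists
lemma fcc_zip_eraseIdx (c g : List String) (i : Nat) :
    (c.take i ++ c.drop (i+1)).zip (g.take i ++ g.drop (i+1)) = (c.zip g).eraseIdx i := by
  induction c generalizing g i with
  | nil => simp
  | cons x c ih =>
    cases g with
    | nil => simp
    | cons y g =>
      cases i with
      | zero => simp
      | succ i => simp [ih]

lemma fcc_decomp {alpha : Type} (l : List alpha) (i : Nat) (h : i < l.length) :
    l = l.take i ++ l[i] :: l.drop (i+1) := by
  conv_lhs => rw [← List.take_append_drop i l]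
  rw [List.getElem_cons_drop h]

-- deleting a position where the predicate holds decrements countP
lemma fcc_countP_eraseIdx {alpha : Type} (l : List alpha) (p : alpha → Bool) (i : Nat)
    (h : i < l.length) (hp : p l[i] = true) :
    (l.eraseIdx i).countP p + 1 = l.countP p := by
  have h2 : l.countP p = (l.take i).countP p + (l[i] :: l.drop (i+1)).countP p := by
    conv_lhs => rw [fcc_decomp l i h]
    rw [List.countP_append]
  rw [List.eraseIdx_eq_take_drop_succ, List.countP_append, h2, List.countP_cons, hp]
  simp only [if_true]
  omega

-- the multiset of a list with position i deleted
lemma fcc_mset_eraseIdx (l : List String) (i : Nat) (h : i < l.length) :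
    (l : Multiset String) = l[i] ::ₘ ((l.eraseIdx i : List String) : Multiset String) := by
  rw [List.eraseIdx_eq_take_drop_succ]
  conv_lhs => rw [fcc_decomp l i h]
  rw [← Multiset.coe_add, ← Multiset.coe_add, ← Multiset.cons_coe, ← Multiset.singleton_add,
    ← Multiset.singleton_add]
  abel

-- what the removal loop does: it deletes an equal multiset m from both lists, m as large as the
-- number of positional matches, and leaves lists with no positional match
lemma fccRemove_spec (cs gs : List String) (i : Nat)
    (hinv : ∀ j (hj1 : j < cs.length) (hj2 : j < gs.length), j < i → cs[j] ≠ gs[j]) :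
    ∃ m : Multiset String,
      (cs : Multiset String) = ((fccRemove cs gs i).1 : Multiset String) + m ∧
      (gs : Multiset String) = ((fccRemove cs gs i).2 : Multiset String) + m ∧
      Multiset.card m = (cs.zip gs).countP (fun p => decide (p.1 = p.2)) ∧
      ((fccRemove cs gs i).1.zip (fccRemove cs gs i).2).countP (fun p => decide (p.1 = p.2)) = 0 ∧
      (fccRemove cs gs i).1.Sublist cs ∧ (fccRemove cs gs i).2.Sublist gs := by
  induction cs, gs, i using fccRemove.induct with
  | case1 cs gs i h heq ih =>
    have hstep : fccRemove cs gs i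
        = fccRemove (cs.take i ++ cs.drop (i+1)) (gs.take i ++ gs.drop (i+1)) 0 := by
      rw [fccRemove.eq_def, dif_pos h, if_pos heq]
    have hce : cs.take i ++ cs.drop (i+1) = cs.eraseIdx i := (List.eraseIdx_eq_take_drop_succ cs i).symm
    have hge : gs.take i ++ gs.drop (i+1) = gs.eraseIdx i := (List.eraseIdx_eq_take_drop_succ gs i).symm
    obtain ⟨m, h1, h2, h3, h4, h5, h6⟩ := ih (fun j hj1 hj2 hj0 => absurd hj0 (Nat.not_lt_zero j))
    rw [hce, hge] at h1 h2 h3 h4 h5 h6 hstep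
    have hzip : (cs.eraseIdx i).zip (gs.eraseIdx i) = (cs.zip gs).eraseIdx i := by
      rw [List.eraseIdx_eq_take_drop_succ, List.eraseIdx_eq_take_drop_succ]
      exact fcc_zip_eraseIdx cs gs i
    have hlz : i < (cs.zip gs).length := by
      rw [List.length_zip]
      omega
    have hp : (fun p : String × String => decide (p.1 = p.2)) (cs.zip gs)[i] = true := by
      simp [List.getElem_zip, heq]
    have hcount := fcc_countP_eraseIdx (cs.zip gs) (fun p => decide (p.1 = p.2)) i hlz hp
    refine ⟨cs[i]'h.1 ::ₘ m, ?_, ?_, ?_, ?_, ?_, ?_⟩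
    · rw [hstep, Multiset.add_cons, fcc_mset_eraseIdx cs i h.1, h1]
    · rw [hstep, Multiset.add_cons, fcc_mset_eraseIdx gs i h.2, h2]
      have : cs[i]'h.1 = gs[i]'h.2 := heq
      rw [this]
    · rw [Multiset.card_cons, h3, ← hzip] at *
      rw [hzip] at hcount ⊢
      omega
    · rw [hstep]
      exact h4
    · rw [hstep]
      exact h5.trans (List.eraseIdx_sublist cs i)
    · rw [hstep]
      exact h6.trans (List.eraseIdx_sublist gs i)
  | case2 cs gs i h hne ih =>
    have hstep : fccRemove cs gs i = fccRemove cs gs (i + 1) := by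
      rw [fccRemove.eq_def, dif_pos h, if_neg hne]
    have hinv' : ∀ j (hj1 : j < cs.length) (hj2 : j < gs.length), j < i + 1 → cs[j] ≠ gs[j] := by
      intro j hj1 hj2 hj
      rcases Nat.lt_succ_iff_lt_or_eq.mp hj with hj' | hj'
      · exact hinv j hj1 hj2 hj'
      · subst hj'
        exact hne
    obtain ⟨m, hrest⟩ := ih hinv'
    rw [hstep]
    exact ⟨m, hrest⟩
  | case3 cs gs i h =>
    have hstep : fccRemove cs gs i = (cs, gs) := by
      rw [fccRemove.eq_def, dif_neg h]
    have hz : (cs.zip gs).countP (fun p => decide (p.1 = p.2)) = 0 := by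
      rw [List.countP_eq_zero]
      intro q hq
      obtain ⟨j, hj, hqe⟩ := List.mem_iff_getElem.mp hq
      have hjc : j < cs.length := by
        have := List.length_zip (l₁ := cs) (l₂ := gs)
        omega
      have hjg : j < gs.length := by
        have := List.length_zip (l₁ := cs) (l₂ := gs)
        omega
      have hji : j < i := by
        have := List.length_zip (l₁ := cs) (l₂ := gs)
        omega
      rw [← hqe]
      simp [List.getElem_zip]
      exact hinv j hjc hjg hji
    exact ⟨0, by simp [hstep], by simp [hstep], by simp [hz], by rw [hstep]; exact hz,
      by rw [hstep], by rw [hstep]⟩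

-- Chars.count.go never returns less than its accumulator
lemma fcc_go_le (sub : List Char) (fuel : Nat) (l : List Char) (acc : Nat) :
    acc ≤ PySem.Chars.count.go sub fuel l acc := by
  induction fuel generalizing l acc with
  | zero => simp [PySem.Chars.count.go]
  | succ fuel ih =>
    cases l with
    | nil => simp [PySem.Chars.count.go]
    | cons h t =>
      rw [PySem.Chars.count.go]
      split
      · exact le_trans (by omega) (ih _ _)
      · exact ih _ _

-- Chars.count.go stays at its accumulator exactly when the pattern does not occur
lemma fcc_go_eq_iff (sub : List Char) (hs : sub ≠ []) (fuel : Nat) (l : List Char) (acc : Nat)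
    (hf : l.length ≤ fuel) :
    (PySem.Chars.count.go sub fuel l acc = acc ↔ ¬ sub <:+: l) := by
  induction fuel generalizing l acc with
  | zero =>
    have : l = [] := by cases l <;> simp_all
    subst this
    simp [PySem.Chars.count.go]
    intro h
    exact hs h
  | succ fuel ih =>
    cases l with
    | nil =>
      simp [PySem.Chars.count.go]
      intro h
      exact hs h
    | cons h t =>
      rw [PySem.Chars.count.go]
      split
      · rename_i hpre
        constructor
        · intro heq
          have := fcc_go_le sub fuel (List.drop sub.length (h :: t)) (acc + 1)
          omega
        · intro hni
          exact absurd ((List.isPrefixOf_iff_prefix.mp hpre).isInfix) hni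
      · rename_i hpre
        rw [ih t acc (by simp at hf; omega)]
        rw [List.infix_cons_iff]
        simp [List.isPrefixOf_iff_prefix] at hpre
        simp [hpre]

-- '.count(sub) >= 1' is 'sub occurs in the string' (for a nonempty pattern)
lemma fcc_count_pos_iff (s sub : List Char) (hs : sub ≠ []) :
    1 ≤ PySem.Chars.count s sub ↔ sub <:+: s := by
  unfold PySem.Chars.count
  rw [if_neg (by simp [hs])]
  have hle := fcc_go_le sub s.length s 0
  have hiff := fcc_go_eq_iff sub hs s.length s 0 le_rfl
  constructor
  · intro h1
    by_contra hni
    have h0 := hiff.mpr hni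
    omega
  · intro hinf
    have : PySem.Chars.count.go sub s.length s 0 ≠ 0 := fun h => (hiff.mp h) hinf
    omega

-- the concatenation loop is flatMap
lemma fcc_concat_eq (g : List String) : fccConcat g = g.flatMap (fun s => s.toList) := by
  unfold fccConcat
  rw [PySem.List.foldl_append_eq_flatMap]
  simp

-- s.count('') is positive
lemma fcc_count_nil_pos (s : List Char) : 1 ≤ PySem.Chars.count s [] := by
  unfold PySem.Chars.count
  simp

-- an element of glist occurs as a substring of the concatenated glist
lemma fcc_mem_infix (g : List String) (x : String) (hx : x ∈ g) :
    x.toList <:+: g.flatMap String.toList := by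
  obtain ⟨l1, l2, rfl⟩ := List.append_of_mem hx
  refine ⟨l1.flatMap String.toList, l2.flatMap String.toList, ?_⟩
  simp

-- the greedy loop appends one 'w' per element of the multiset intersection
lemma fccGreedy_spec (glist1 cs g acc : List String)
    (hpre : ∀ x ∈ cs,
      cs.count x ≤ g.count x ∨
      (x.toList ≠ [] ∧ ∀ sl : List String, sl.Sublist glist1 →
        PySem.Chars.isIn x.toList (sl.flatMap String.toList) = true → x ∈ sl))
    (hsub : g.Sublist glist1) :
    fccGreedy cs g (fccConcat g) acc
      = acc ++ List.replicate (Multiset.card ((cs : Multiset String) ∩ (g : Multiset String))) "w" := by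
  induction cs generalizing g acc with
  | nil => simp [fccGreedy]
  | cons x rest ih =>
    have hbranch : 1 ≤ PySem.Chars.count (fccConcat g) x.toList ↔ x ∈ g := by
      constructor
      · intro hcnt
        rcases hpre x (by simp) with h1 | ⟨hne, hsl⟩
        · have hx1 : 1 ≤ (x :: rest).count x := by
            rw [List.count_cons_self]
            omega
          exact List.count_pos_iff.mp (by omega)
        · exact hsl g hsub ((PySem.Chars.isIn_iff_infix _ _).mpr
            (by rw [← fcc_concat_eq]; exact (fcc_count_pos_iff _ _ hne).mp hcnt))
      · intro hxg
        by_cases hxe : x.toList = []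
        · rw [hxe]
          exact fcc_count_nil_pos _
        · rw [fcc_count_pos_iff _ _ hxe, fcc_concat_eq]
          exact fcc_mem_infix g x hxg
    by_cases hm : x ∈ g
    · have hcnt : 1 ≤ PySem.Chars.count (fccConcat g) x.toList := hbranch.mpr hm
      have hrm : PySem.List.remove? g x = some (g.erase x) := by
        rw [PySem.List.remove?_eq_some_erase]
        exact hm
      have hpre' : ∀ y ∈ rest,
          rest.count y ≤ (g.erase x).count y ∨
          (y.toList ≠ [] ∧ ∀ sl : List String, sl.Sublist glist1 →
            PySem.Chars.isIn y.toList (sl.flatMap String.toList) = true → y ∈ sl) := by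
        intro y hy
        rcases hpre y (by simp [hy]) with h1 | h2
        · left
          by_cases hyx : y = x
          · subst hyx
            rw [List.count_cons_self] at h1
            rw [List.count_erase_self]
            omega
          · rw [List.count_erase_of_ne hyx]
            rw [List.count_cons_of_ne (Ne.symm hyx)] at h1
            exact h1
        · right
          exact h2
      rw [fccGreedy]
      simp only [if_pos hcnt, hrm]
      rw [ih (g.erase x) (acc ++ ["w"]) hpre' (List.erase_sublist.trans hsub)]
      rw [← Multiset.cons_coe, Multiset.cons_inter_of_pos _ (Multiset.mem_coe.mpr hm),
        Multiset.coe_erase]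
      simp [List.replicate_succ]
    · have hcnt : ¬ 1 ≤ PySem.Chars.count (fccConcat g) x.toList := fun h => hm (hbranch.mp h)
      have hpre' : ∀ y ∈ rest,
          rest.count y ≤ g.count y ∨
          (y.toList ≠ [] ∧ ∀ sl : List String, sl.Sublist glist1 →
            PySem.Chars.isIn y.toList (sl.flatMap String.toList) = true → y ∈ sl) := by
        intro y hy
        rcases hpre y (by simp [hy]) with h1 | h2
        · left
          by_cases hyx : y = x
          · subst hyx
            rw [List.count_cons_self] at h1
            omega
          · rw [List.count_cons_of_ne (Ne.symm hyx)] at h1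
            exact h1
        · right
          exact h2
      rw [fccGreedy]
      simp only [if_neg hcnt]
      rw [ih g acc hpre' hsub]
      rw [← Multiset.cons_coe, Multiset.cons_inter_of_neg _ (fun hx => hm (Multiset.mem_coe.mp hx))]

-- sums of Nat casts
lemma fcc_cast_sum (l : List String) (f : String → Nat) :
    (l.map (fun k => ((f k : Nat) : Int))).sum = (((l.map f).sum : Nat) : Int) := by
  induction l with
  | nil => simp
  | cons x t ih => simp [ih]

-- the sum of per-colour minima is the cardinality of the multiset intersection
lemma fcc_sum_min (c g : List String) :
    ((PySem.List.dedup c).map (fun k => min (c.count k) (g.count k))).sum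
      = Multiset.card ((c : Multiset String) ∩ (g : Multiset String)) := by
  rw [← List.sum_toFinset _ (PySem.List.nodup_dedup c)]
  have hfs : (PySem.List.dedup c).toFinset = c.toFinset := by
    ext a
    simp
  rw [hfs, ← Multiset.toFinset_sum_count_eq ((c : Multiset String) ∩ (g : Multiset String))]
  have hsub : ((c : Multiset String) ∩ (g : Multiset String)).toFinset ⊆ c.toFinset := by
    intro a ha
    rw [Multiset.mem_toFinset, Multiset.mem_inter] at ha
    rw [List.mem_toFinset]
    exact Multiset.mem_coe.mp ha.1
  rw [Finset.sum_subset hsub (fun a _ hna => Multiset.count_eq_zero.mpr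
    (fun hmem => hna (Multiset.mem_toFinset.mpr hmem)))]
  refine Finset.sum_congr rfl (fun a _ => ?_)
  rw [Multiset.count_inter]
  simp [Multiset.coe_count]

-- B in closed form
lemma fcc_alt_eq (c g : List String) :
    find_colour_correct_alt c g
      = List.replicate (Multiset.card ((c : Multiset String) ∩ (g : Multiset String))
          - (c.zip g).countP (fun p => decide (p.1 = p.2))) "w" := by
  simp only [find_colour_correct_alt]
  rw [PySem.List.foldl_ite_add_one (fun p : String × String => p.1 = p.2) (c.zip g) 0,
    PySem.Dict.foldl_insert_getD_add_one_eq_counter g,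
    PySem.Dict.foldl_insert_getD_add_one_eq_counter c,
    PySem.Dict.items_counter,
    PySem.List.foldl_add _
      (fun p : String × Int => if p.2 < (PySem.Dict.counter g).getD p.1 0 then p.2
        else (PySem.Dict.counter g).getD p.1 0) 0,
    List.map_map]
  have hfun : ((fun p : String × Int => if p.2 < (PySem.Dict.counter g).getD p.1 0 then p.2
        else (PySem.Dict.counter g).getD p.1 0) ∘ (fun k => (k, ((List.count k c : Nat) : Int))))
      = fun k => ((min (List.count k c) (List.count k g) : Nat) : Int) := by
    funext k
    simp only [Function.comp, PySem.Dict.getD_counter]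
    split_ifs with hlt
    · rw [Nat.cast_lt] at hlt
      rw [Nat.cast_inj]
      omega
    · rw [Nat.cast_lt] at hlt
      rw [Nat.cast_inj]
      omega
  rw [hfun, fcc_cast_sum (PySem.Set.ofList c) (fun k => min (List.count k c) (List.count k g)),
    ← PySem.List.dedup_eq_ofList]
  have hmin : ((PySem.List.dedup c).map (fun k => min (List.count k c) (List.count k g))).sum
      = Multiset.card ((c : Multiset String) ∩ (g : Multiset String)) := fcc_sum_min c g
  rw [hmin, PySem.List.pyRepeat_singleton, zero_add, zero_add, Int.toNat_sub]

-- ===== VERDICT (by name: the statement is the Claim_ definition above) =====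
theorem find_colour_correct_spec : Claim_equal_find_colour_correct := by
  intro clist glist1 _hdom hpre
  unfold Pre_find_colour_correct at hpre
  unfold Spec_find_colour_correct
  simp only [find_colour_correct]
  rw [PySem.List.foldl_append_singleton_eq_self, List.nil_append]
  obtain ⟨m, hcm, hgm, hcard, hzero, hsc, hsg⟩ := fccRemove_spec clist glist1 0
    (fun j _ _ hj0 => absurd hj0 (Nat.not_lt_zero j))
  have hpre' : ∀ x ∈ (fccRemove clist glist1 0).1,
      (fccRemove clist glist1 0).1.count x ≤ (fccRemove clist glist1 0).2.count x ∨
      (x.toList ≠ [] ∧ ∀ sl : List String, sl.Sublist glist1 →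
        PySem.Chars.isIn x.toList (sl.flatMap String.toList) = true → x ∈ sl) := by
    intro x hx
    rcases hpre x (hsc.subset hx) with h1 | h2
    · left
      have e1 : clist.count x
          = (fccRemove clist glist1 0).1.count x + Multiset.count x m := by
        have := congrArg (Multiset.count x) hcm
        rw [Multiset.count_add, Multiset.coe_count, Multiset.coe_count] at this
        exact this
      have e2 : glist1.count x
          = (fccRemove clist glist1 0).2.count x + Multiset.count x m := by
        have := congrArg (Multiset.count x) hgm
        rw [Multiset.count_add, Multiset.coe_count, Multiset.coe_count] at this
        exact this
      omega
    · right
      refine ⟨?_, fun sl hsl hin => h2 sl (List.mem_sublists.mpr hsl) hin⟩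
      intro hxe
      have h0 := h2 [] (List.mem_sublists.mpr (List.nil_sublist glist1))
        (by rw [hxe]; simp [PySem.Chars.isIn_nil])
      simp at h0
  rw [fccGreedy_spec glist1 _ _ [] hpre' hsg, List.nil_append, fcc_alt_eq]
  congr 1
  have hinter : Multiset.card ((clist : Multiset String) ∩ (glist1 : Multiset String))
      = Multiset.card (((fccRemove clist glist1 0).1 : Multiset String)
          ∩ ((fccRemove clist glist1 0).2 : Multiset String)) + Multiset.card m := by
    rw [hcm, hgm, ← Multiset.inter_add_distrib, Multiset.card_add]
  omega
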